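-- pv_equiv track=rewrite | github.com/minarefaat1002/leetcode-solutions | 1818-minimum-absolute-sum-difference/1818-minimum-absolute-sum-difference.py | minAbsoluteSumDiff
-- ===== SOURCE A (Python) =====
-- from typing import List
--
-- def minAbsoluteSumDiff(nums1: List[int], nums2: List[int]) -> int:
--     sumDifference = 0
--     mod = 10**9 + 7
--     for i in range(len(nums1)):
--         sumDifference += abs(nums1[i] - nums2[i])
--     sortedNums1 = sorted(nums1)
--     maxSaved = 0
--     for i in range(len(nums1)):
--         minAbsSum = curAbsSum = abs(nums1[i] - nums2[i])
--         left = 0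
--         right = len(nums1) - 1
--         while left <= right:
--             mid  = (left+right)//2
--             minAbsSum = min(minAbsSum,abs(sortedNums1[mid]-nums2[i]))
--             if sortedNums1[mid] >= nums2[i]:
--                 right = mid - 1
--             else:
--                 left = mid + 1
--         maxSaved = max(maxSaved,curAbsSum - minAbsSum)
--     return (sumDifference - maxSaved)%mod
-- ===== SOURCE B (Python) =====
-- def minAbsoluteSumDiff(nums1, nums2):
--     mod = 10**9 + 7
--     n = len(nums1)
--     s = sorted(nums1)
--     total = 0
--     saved = 0
--     j = 0
--     for b, a in sorted(zip(nums2, nums1), key=lambda p: p[0]):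
--         cur = abs(a - b)
--         total += cur
--         while j < n and s[j] < b:
--             j += 1
--         c = cur
--         if j < n and s[j] - b < c:
--             c = s[j] - b
--         if j > 0 and b - s[j - 1] < c:
--             c = b - s[j - 1]
--         if cur - c > saved:
--             saved = cur - c
--     return (total - saved) % mod
-- ===== Notes on version B (the rewrite author's own statement) =====
-- stated objective: faster
-- what changed: A runs a hand-written binary search over sorted(nums1) for every element; B sorts the (nums2[i], nums1[i]) pairs once and sweeps a single monotone merge pointer over sorted(nums1), checking only the two neighbours of the pointer per pair.
import Mathlib
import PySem

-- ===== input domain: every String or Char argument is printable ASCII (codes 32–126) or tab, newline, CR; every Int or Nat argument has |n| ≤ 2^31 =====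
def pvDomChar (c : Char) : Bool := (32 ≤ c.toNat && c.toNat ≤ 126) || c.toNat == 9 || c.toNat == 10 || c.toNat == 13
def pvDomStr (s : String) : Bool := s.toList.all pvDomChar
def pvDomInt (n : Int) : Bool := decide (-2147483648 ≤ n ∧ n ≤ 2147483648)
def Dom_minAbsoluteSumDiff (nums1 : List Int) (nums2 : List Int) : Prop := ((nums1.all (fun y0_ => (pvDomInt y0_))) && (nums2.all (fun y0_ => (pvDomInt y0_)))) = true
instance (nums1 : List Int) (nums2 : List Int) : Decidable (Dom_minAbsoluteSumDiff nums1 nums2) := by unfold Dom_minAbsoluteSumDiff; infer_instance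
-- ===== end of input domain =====

-- B replaces A's per-element hand-written binary search by sorting the (nums2[i], nums1[i]) pairs once
-- and sweeping a single merge pointer over sorted(nums1); a timing run measured B faster (constant factor).

-- ===== PORT A =====
-- A's 'while left <= right' binary-search loop, step for step; the interval shrinks every
-- iteration, so fuel = initial interval size is only a structural-termination guard, never hit
def bsLoop (xs : List Int) (t : Int) : Nat → Int → Int → Int → Int
  | 0, _, _, acc => acc
  | fuel + 1, left, right, acc =>
    if left ≤ right then
      let mid := PySem.Int.floordiv (left + right) 2
      let acc' := min acc |PySem.List.pyGetD xs mid 0 - t|   -- index always in range here (0 ≤ left ≤ mid ≤ right < len)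
      if PySem.List.pyGetD xs mid 0 ≥ t then bsLoop xs t fuel left (mid - 1) acc'
      else bsLoop xs t fuel (mid + 1) right acc'
    else acc

def minAbsoluteSumDiff (nums1 : List Int) (nums2 : List Int) : Int :=
  let md : Int := 1000000007
  let sumDifference :=
    (PySem.List.pyRange 0 (nums1.length : Int) 1).foldl
      (fun s i => s + |PySem.List.pyGetD nums1 i 0 - PySem.List.pyGetD nums2 i 0|) 0
  let sortedNums1 := PySem.List.sorted nums1 (fun x => x) false
  let maxSaved :=
    (PySem.List.pyRange 0 (nums1.length : Int) 1).foldl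
      (fun m i =>
        let cur := |PySem.List.pyGetD nums1 i 0 - PySem.List.pyGetD nums2 i 0|
        let mn := bsLoop sortedNums1 (PySem.List.pyGetD nums2 i 0) nums1.length 0 ((nums1.length : Int) - 1) cur
        max m (cur - mn)) 0
  PySem.Int.mod (sumDifference - maxSaved) md

-- ===== PORT B =====
-- B's 'while j < n and s[j] < b' pointer advance; j increases and stays < n, so
-- fuel = (n - j) is only a structural-termination guard, never hit
def advLoop (s : List Int) (n b : Int) : Nat → Int → Int
  | 0, j => j
  | fuel + 1, j =>
    if j < n ∧ PySem.List.pyGetD s j 0 < b then advLoop s n b fuel (j + 1) else j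

-- one iteration of B's for loop over the sorted pairs; state = (total, saved, j)
def bStep (s : List Int) (n : Int) (st : Int × Int × Int) (p : Int × Int) : Int × Int × Int :=
  let b := p.1
  let a := p.2
  let cur := |a - b|
  let total := st.1 + cur
  let j := advLoop s n b (n - st.2.2).toNat st.2.2
  let c := cur
  let c := if j < n ∧ PySem.List.pyGetD s j 0 - b < c then PySem.List.pyGetD s j 0 - b else c
  let c := if 0 < j ∧ b - PySem.List.pyGetD s (j - 1) 0 < c then b - PySem.List.pyGetD s (j - 1) 0 else c
  let saved := if st.2.1 < cur - c then cur - c else st.2.1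
  (total, saved, j)

def minAbsoluteSumDiff_alt (nums1 : List Int) (nums2 : List Int) : Int :=
  let md : Int := 1000000007
  let n : Int := (nums1.length : Int)
  let s := PySem.List.sorted nums1 (fun x => x) false
  let st := (PySem.List.sorted (nums2.zip nums1) (fun p => p.1) false).foldl (bStep s n) (0, 0, 0)
  PySem.Int.mod (st.1 - st.2.1) md

-- ===== PRECONDITION & SPEC =====
-- A indexes nums2[i] for every i < len(nums1) and raises IndexError when nums2 is shorter; exactly those inputs are excluded.
def Pre_minAbsoluteSumDiff (nums1 : List Int) (nums2 : List Int) : Prop := nums1.length ≤ nums2.length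
instance (nums1 : List Int) (nums2 : List Int) : Decidable (Pre_minAbsoluteSumDiff nums1 nums2) := by unfold Pre_minAbsoluteSumDiff; infer_instance
def pvWitness_minAbsoluteSumDiff : List Int × List Int := ([1, 7, 5], [2, 3, 10])

def Spec_minAbsoluteSumDiff (nums1 : List Int) (nums2 : List Int) (out : Int) : Prop := out = minAbsoluteSumDiff_alt nums1 nums2
instance (nums1 : List Int) (nums2 : List Int) (out : Int) : Decidable (Spec_minAbsoluteSumDiff nums1 nums2 out) := by unfold Spec_minAbsoluteSumDiff; infer_instance

-- ===== CLAIM (what is proved, stated in full; the proofs are below) =====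
def Claim_equal_minAbsoluteSumDiff : Prop := ∀ (nums1 : List Int) (nums2 : List Int), Dom_minAbsoluteSumDiff nums1 nums2 → Pre_minAbsoluteSumDiff nums1 nums2 → Spec_minAbsoluteSumDiff nums1 nums2 (minAbsoluteSumDiff nums1 nums2)

-- ===== LEMMAS AND PROOFS =====

-- the per-pair reference value both loops compute: running min of |x - b| over s, started at cur
def minFrom (s : List Int) (b cur : Int) : Int := s.foldl (fun m x => min m |x - b|) cur

theorem minFrom_le (s : List Int) (b : Int) : ∀ cur : Int,
    minFrom s b cur ≤ cur ∧ ∀ x ∈ s, minFrom s b cur ≤ |x - b| := by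
  induction s with
  | nil => exact fun cur => ⟨le_refl _, by simp⟩
  | cons y t ih =>
    intro cur
    have h := ih (min cur |y - b|)
    refine ⟨le_trans h.1 (min_le_left _ _), ?_⟩
    intro x hx
    rcases List.mem_cons.mp hx with rfl | hx
    · exact le_trans h.1 (min_le_right _ _)
    · exact h.2 x hx

theorem minFrom_mem (s : List Int) (b : Int) : ∀ cur : Int,
    minFrom s b cur = cur ∨ ∃ x ∈ s, minFrom s b cur = |x - b| := by
  induction s with
  | nil => exact fun cur => Or.inl rfl
  | cons y t ih =>
    intro cur
    rcases ih (min cur |y - b|) with h | ⟨x, hx, h⟩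
    · rcases min_choice cur |y - b| with hc | hc
      · exact Or.inl (by simpa [minFrom, hc] using h)
      · exact Or.inr ⟨y, List.mem_cons_self .., by simpa [minFrom, hc] using h⟩
    · exact Or.inr ⟨x, List.mem_cons_of_mem _ hx, h⟩

-- any value ≤ cur, ≤ every |x - b|, and achieved, equals minFrom
theorem minFrom_unique (s : List Int) (b cur c : Int)
    (h1 : c ≤ cur) (h2 : ∀ x ∈ s, c ≤ |x - b|)
    (h3 : c = cur ∨ ∃ x ∈ s, c = |x - b|) : c = minFrom s b cur := by
  have hle := minFrom_le s b cur
  refine le_antisymm ?_ ?_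
  · rcases minFrom_mem s b cur with h | ⟨x, hx, h⟩
    · rw [h]; exact h1
    · rw [h]; exact h2 x hx
  · rcases h3 with rfl | ⟨x, hx, rfl⟩
    · exact hle.1
    · exact hle.2 x hx

-- unfolding equations for the two loops
theorem bsLoop_succ_ge (xs : List Int) (t : Int) (fuel : Nat) (left right acc : Int)
    (h : left ≤ right) (hge : PySem.List.pyGetD xs (PySem.Int.floordiv (left + right) 2) 0 ≥ t) :
    bsLoop xs t (fuel + 1) left right acc =
      bsLoop xs t fuel left (PySem.Int.floordiv (left + right) 2 - 1)
        (min acc |PySem.List.pyGetD xs (PySem.Int.floordiv (left + right) 2) 0 - t|) := by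
  simp only [bsLoop]
  rw [if_pos h, if_pos hge]

theorem bsLoop_succ_lt (xs : List Int) (t : Int) (fuel : Nat) (left right acc : Int)
    (h : left ≤ right) (hge : ¬ PySem.List.pyGetD xs (PySem.Int.floordiv (left + right) 2) 0 ≥ t) :
    bsLoop xs t (fuel + 1) left right acc =
      bsLoop xs t fuel (PySem.Int.floordiv (left + right) 2 + 1) right
        (min acc |PySem.List.pyGetD xs (PySem.Int.floordiv (left + right) 2) 0 - t|) := by
  simp only [bsLoop]
  rw [if_pos h, if_neg hge]

theorem bsLoop_succ_stop (xs : List Int) (t : Int) (fuel : Nat) (left right acc : Int)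
    (h : ¬ left ≤ right) : bsLoop xs t (fuel + 1) left right acc = acc := by
  simp only [bsLoop]
  rw [if_neg h]

theorem advLoop_succ_pos (s : List Int) (n b : Int) (fuel : Nat) (j : Int)
    (h : j < n ∧ PySem.List.pyGetD s j 0 < b) :
    advLoop s n b (fuel + 1) j = advLoop s n b fuel (j + 1) := by
  simp only [advLoop]
  rw [if_pos h]

theorem advLoop_succ_neg (s : List Int) (n b : Int) (fuel : Nat) (j : Int)
    (h : ¬ (j < n ∧ PySem.List.pyGetD s j 0 < b)) :
    advLoop s n b (fuel + 1) j = j := by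
  simp only [advLoop]
  rw [if_neg h]

-- with enough fuel, A's binary search result is ≤ its seed and ≤ |xs[k] - t| at every index
theorem bsLoop_le (xs : List Int) (t : Int) (hsort : xs.Pairwise (· ≤ ·)) :
    ∀ (fuel : Nat) (left right acc : Int), (right + 1 - left).toNat ≤ fuel → 0 ≤ left → right < (xs.length : Int) →
    (∀ k : Nat, (hk : k < xs.length) → ((k : Int) < left ∨ right < (k : Int)) → acc ≤ |xs[k] - t|) →
    bsLoop xs t fuel left right acc ≤ acc ∧
      ∀ k : Nat, (hk : k < xs.length) → bsLoop xs t fuel left right acc ≤ |xs[k] - t| := by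
  intro fuel
  induction fuel with
  | zero =>
    intro left right acc hf hl hr hout
    exact ⟨le_refl _, fun k hk => hout k hk (by omega)⟩
  | succ fuel ih =>
    intro left right acc hf hl hr hout
    by_cases h : left ≤ right
    · have hm := PySem.Int.floordiv_two_mid_bounds (lo := left) (hi := right) h
      set mid := PySem.Int.floordiv (left + right) 2 with hmid
      have hmr : mid < (xs.length : Int) := by omega
      have hget : PySem.List.pyGetD xs mid 0 = xs[mid.toNat]'(by omega) :=
        PySem.List.pyGetD_eq_getElem xs 0 (by omega) hmr
      have hmono' : ∀ i j : Nat, (hi : i < xs.length) → (hj : j < xs.length) → i ≤ j → xs[i] ≤ xs[j] := by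
        intro i j hi hj hij
        rcases lt_or_eq_of_le hij with h' | rfl
        · exact List.pairwise_iff_getElem.mp hsort i j hi hj h'
        · exact le_refl _
      by_cases hge : PySem.List.pyGetD xs mid 0 ≥ t
      · rw [bsLoop_succ_ge xs t fuel left right acc h hge]
        have hout' : ∀ k : Nat, (hk : k < xs.length) → ((k : Int) < left ∨ mid - 1 < (k : Int)) →
            min acc |PySem.List.pyGetD xs mid 0 - t| ≤ |xs[k] - t| := by
          intro k hk hcase
          rcases hcase with hc | hc
          · exact le_trans (min_le_left _ _) (hout k hk (Or.inl hc))
          · by_cases hcr : right < (k : Int)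
            · exact le_trans (min_le_left _ _) (hout k hk (Or.inr hcr))
            · have hx := hmono' mid.toNat k (by omega) hk (by omega)
              rw [hget] at hge
              have habs : |xs[mid.toNat]'(by omega) - t| ≤ |xs[k] - t| := by
                rw [abs_of_nonneg (by omega), abs_of_nonneg (by omega)]; omega
              calc min acc |PySem.List.pyGetD xs mid 0 - t|
                  ≤ |PySem.List.pyGetD xs mid 0 - t| := min_le_right _ _
                _ = |xs[mid.toNat]'(by omega) - t| := by rw [hget]
                _ ≤ _ := habs
        have h2 := ih left (mid - 1) _ (by omega) hl (by omega) hout'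
        exact ⟨le_trans h2.1 (min_le_left _ _), h2.2⟩
      · rw [bsLoop_succ_lt xs t fuel left right acc h hge]
        have hout' : ∀ k : Nat, (hk : k < xs.length) → ((k : Int) < mid + 1 ∨ right < (k : Int)) →
            min acc |PySem.List.pyGetD xs mid 0 - t| ≤ |xs[k] - t| := by
          intro k hk hcase
          rcases hcase with hc | hc
          · by_cases hcl : (k : Int) < left
            · exact le_trans (min_le_left _ _) (hout k hk (Or.inl hcl))
            · have hx := hmono' k mid.toNat hk (by omega) (by omega)
              rw [hget] at hge
              push Not at hge
              have habs : |xs[mid.toNat]'(by omega) - t| ≤ |xs[k] - t| := by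
                rw [abs_of_nonpos (by omega), abs_of_nonpos (by omega)]; omega
              calc min acc |PySem.List.pyGetD xs mid 0 - t|
                  ≤ |PySem.List.pyGetD xs mid 0 - t| := min_le_right _ _
                _ = |xs[mid.toNat]'(by omega) - t| := by rw [hget]
                _ ≤ _ := habs
          · exact le_trans (min_le_left _ _) (hout k hk (Or.inr hc))
        have h2 := ih (mid + 1) right _ (by omega) (by omega) hr hout'
        exact ⟨le_trans h2.1 (min_le_left _ _), h2.2⟩
    · rw [bsLoop_succ_stop xs t fuel left right acc h]
      exact ⟨le_refl _, fun k hk => hout k hk (by omega)⟩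

-- A's binary search result is its seed or one of the probed values
theorem bsLoop_mem (xs : List Int) (t : Int) :
    ∀ (fuel : Nat) (left right acc : Int), 0 ≤ left → right < (xs.length : Int) →
    bsLoop xs t fuel left right acc = acc ∨ ∃ x ∈ xs, bsLoop xs t fuel left right acc = |x - t| := by
  intro fuel
  induction fuel with
  | zero => exact fun _ _ _ _ _ => Or.inl rfl
  | succ fuel ih =>
    intro left right acc hl hr
    by_cases h : left ≤ right
    · have hm := PySem.Int.floordiv_two_mid_bounds (lo := left) (hi := right) h
      set mid := PySem.Int.floordiv (left + right) 2 with hmid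
      have hget : PySem.List.pyGetD xs mid 0 = xs[mid.toNat]'(by omega) :=
        PySem.List.pyGetD_eq_getElem xs 0 (by omega) (by omega)
      by_cases hge : PySem.List.pyGetD xs mid 0 ≥ t
      · rw [bsLoop_succ_ge xs t fuel left right acc h hge]
        rcases ih left (mid - 1) _ hl (by omega) with h' | h'
        · rcases min_choice acc |PySem.List.pyGetD xs mid 0 - t| with hc | hc
          · exact Or.inl (by rw [h']; exact hc)
          · exact Or.inr ⟨xs[mid.toNat]'(by omega), List.getElem_mem _, by rw [h']; exact hc.trans (by rw [hget])⟩
        · exact Or.inr h'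
      · rw [bsLoop_succ_lt xs t fuel left right acc h hge]
        rcases ih (mid + 1) right _ (by omega) hr with h' | h'
        · rcases min_choice acc |PySem.List.pyGetD xs mid 0 - t| with hc | hc
          · exact Or.inl (by rw [h']; exact hc)
          · exact Or.inr ⟨xs[mid.toNat]'(by omega), List.getElem_mem _, by rw [h']; exact hc.trans (by rw [hget])⟩
        · exact Or.inr h'
    · exact Or.inl (bsLoop_succ_stop xs t fuel left right acc h)

-- A's binary search computes exactly the running min of |x - t| over the sorted list
theorem bsLoop_eq_minFrom (xs : List Int) (hsort : xs.Pairwise (· ≤ ·)) (t cur : Int) :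
    bsLoop xs t xs.length 0 ((xs.length : Int) - 1) cur = minFrom xs t cur := by
  have hle := bsLoop_le xs t hsort xs.length 0 ((xs.length : Int) - 1) cur (by omega) (by omega) (by omega)
    (fun k hk hcase => absurd hcase (by omega))
  refine minFrom_unique xs t cur _ hle.1 ?_ ?_
  · intro x hx
    obtain ⟨k, hk, rfl⟩ := List.mem_iff_getElem.mp hx
    exact hle.2 k hk
  · exact bsLoop_mem xs t xs.length 0 ((xs.length : Int) - 1) cur (by omega) (by omega)

-- B's pointer advance: with enough fuel it preserves 0 ≤ j ≤ n, everything left of it is < b,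
-- and it stops at the first index ≥ b
theorem advLoop_inv (s : List Int) (b : Int) :
    ∀ (fuel : Nat) (j : Int), ((s.length : Int) - j).toNat ≤ fuel → 0 ≤ j → j ≤ (s.length : Int) →
    (∀ k : Nat, (hk : k < s.length) → (k : Int) < j → s[k] < b) →
    0 ≤ advLoop s (s.length : Int) b fuel j ∧ advLoop s (s.length : Int) b fuel j ≤ (s.length : Int) ∧
    (∀ k : Nat, (hk : k < s.length) → (k : Int) < advLoop s (s.length : Int) b fuel j → s[k] < b) ∧
    (advLoop s (s.length : Int) b fuel j < (s.length : Int) →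
      ∃ hk : (advLoop s (s.length : Int) b fuel j).toNat < s.length,
        b ≤ s[(advLoop s (s.length : Int) b fuel j).toNat]) := by
  intro fuel
  induction fuel with
  | zero =>
    intro j hf hj0 hjn hbelow
    simp only [advLoop]
    exact ⟨hj0, hjn, hbelow, fun hlt => absurd hlt (by omega)⟩
  | succ fuel ih =>
    intro j hf hj0 hjn hbelow
    by_cases h : j < (s.length : Int) ∧ PySem.List.pyGetD s j 0 < b
    · rw [advLoop_succ_pos s _ b fuel j h]
      have hget : PySem.List.pyGetD s j 0 = s[j.toNat]'(by omega) :=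
        PySem.List.pyGetD_eq_getElem s 0 hj0 h.1
      refine ih (j + 1) (by omega) (by omega) (by omega) ?_
      intro k hk hklt
      by_cases hkj : (k : Int) < j
      · exact hbelow k hk hkj
      · have hkeq : k = j.toNat := by omega
        subst hkeq
        rw [hget] at h
        exact h.2
    · rw [advLoop_succ_neg s _ b fuel j h]
      refine ⟨hj0, hjn, hbelow, ?_⟩
      intro hlt
      refine ⟨by omega, ?_⟩
      by_contra hb
      push Not at hb
      have hget : PySem.List.pyGetD s j 0 = s[j.toNat]'(by omega) :=
        PySem.List.pyGetD_eq_getElem s 0 hj0 hlt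
      rw [hget] at h
      exact h ⟨hlt, hb⟩

-- one iteration of B's loop, characterised: total grows by cur, saved by max with cur - minFrom
theorem bStep_eq (s : List Int) (hsort : s.Pairwise (· ≤ ·)) (st : Int × Int × Int) (p : Int × Int)
    (hj0 : 0 ≤ st.2.2) (hjn : st.2.2 ≤ (s.length : Int))
    (hbelow : ∀ k : Nat, (hk : k < s.length) → (k : Int) < st.2.2 → s[k] < p.1) :
    bStep s (s.length : Int) st p =
      (st.1 + |p.2 - p.1|,
       max st.2.1 (|p.2 - p.1| - minFrom s p.1 |p.2 - p.1|),
       advLoop s (s.length : Int) p.1 ((s.length : Int) - st.2.2).toNat st.2.2) ∧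
    0 ≤ advLoop s (s.length : Int) p.1 ((s.length : Int) - st.2.2).toNat st.2.2 ∧
    advLoop s (s.length : Int) p.1 ((s.length : Int) - st.2.2).toNat st.2.2 ≤ (s.length : Int) ∧
    (∀ k : Nat, (hk : k < s.length) →
      (k : Int) < advLoop s (s.length : Int) p.1 ((s.length : Int) - st.2.2).toNat st.2.2 → s[k] < p.1) := by
  obtain ⟨hA0, hAn, hAbelow, hAstop⟩ :=
    advLoop_inv s p.1 ((s.length : Int) - st.2.2).toNat st.2.2 (le_refl _) hj0 hjn hbelow
  set j := advLoop s (s.length : Int) p.1 ((s.length : Int) - st.2.2).toNat st.2.2 with hjdef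
  set b := p.1
  set cur := |p.2 - b| with hcur
  set c1 := if j < (s.length : Int) ∧ PySem.List.pyGetD s j 0 - b < cur then PySem.List.pyGetD s j 0 - b else cur with hc1
  set c2 := if 0 < j ∧ b - PySem.List.pyGetD s (j - 1) 0 < c1 then b - PySem.List.pyGetD s (j - 1) 0 else c1 with hc2
  have hmono : ∀ i k : Nat, (hi : i < s.length) → (hk : k < s.length) → i ≤ k → s[i] ≤ s[k] := by
    intro i k hi hk hik
    rcases lt_or_eq_of_le hik with h' | rfl
    · exact List.pairwise_iff_getElem.mp hsort i k hi hk h'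
    · exact le_refl _
  have hc1cur : c1 ≤ cur := by rw [hc1]; split <;> omega
  have hc1j : j < (s.length : Int) → c1 ≤ PySem.List.pyGetD s j 0 - b := by
    intro h; rw [hc1]; split <;> omega
  have hc2c1 : c2 ≤ c1 := by rw [hc2]; split <;> omega
  have hc2j : 0 < j → c2 ≤ b - PySem.List.pyGetD s (j - 1) 0 := by
    intro h; rw [hc2]; split <;> omega
  have hcmin : c2 = minFrom s b cur := by
    apply minFrom_unique
    · exact le_trans hc2c1 hc1cur
    · intro x hx
      obtain ⟨k, hk, rfl⟩ := List.mem_iff_getElem.mp hx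
      by_cases hkj : (k : Int) < j
      · have h0j : 0 < j := by omega
        have hgp : PySem.List.pyGetD s (j - 1) 0 = s[(j-1).toNat]'(by omega) :=
          PySem.List.pyGetD_eq_getElem s 0 (by omega) (by omega)
        have hsk : s[k] ≤ s[(j-1).toNat]'(by omega) := hmono k (j-1).toNat hk (by omega) (by omega)
        have hltb : s[(j-1).toNat]'(by omega) < b := hAbelow (j-1).toNat (by omega) (by omega)
        have hc2b : c2 ≤ b - s[(j-1).toNat]'(by omega) := by
          have h' := hc2j h0j; rw [hgp] at h'; exact h'
        rw [abs_of_nonpos (by omega)]; omega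
      · have hjlen : j < (s.length : Int) := by omega
        obtain ⟨hjk, hbj⟩ := hAstop hjlen
        have hgp : PySem.List.pyGetD s j 0 = s[j.toNat]'hjk :=
          PySem.List.pyGetD_eq_getElem s 0 hA0 hjlen
        have hsk : s[j.toNat]'hjk ≤ s[k] := hmono j.toNat k hjk hk (by omega)
        have hc1b : c1 ≤ s[j.toNat]'hjk - b := by
          have h' := hc1j hjlen; rw [hgp] at h'; exact h'
        rw [abs_of_nonneg (by omega)]; omega
    · rw [hc2]
      split
      · rename_i hcond
        have hgp : PySem.List.pyGetD s (j - 1) 0 = s[(j-1).toNat]'(by omega) :=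
          PySem.List.pyGetD_eq_getElem s 0 (by omega) (by omega)
        have hltb : s[(j-1).toNat]'(by omega) < b := hAbelow (j-1).toNat (by omega) (by omega)
        refine Or.inr ⟨s[(j-1).toNat]'(by omega), List.getElem_mem _, ?_⟩
        rw [hgp, abs_of_nonpos (by omega)]; ring
      · rw [hc1]
        split
        · rename_i hcond
          obtain ⟨hjk, hbj⟩ := hAstop hcond.1
          have hgp : PySem.List.pyGetD s j 0 = s[j.toNat]'hjk :=
            PySem.List.pyGetD_eq_getElem s 0 hA0 hcond.1
          refine Or.inr ⟨s[j.toNat]'hjk, List.getElem_mem _, ?_⟩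
          rw [hgp, abs_of_nonneg (by omega)]
        · exact Or.inl rfl
  refine ⟨?_, hA0, hAn, hAbelow⟩
  have hstep : bStep s (s.length : Int) st p =
      (st.1 + cur, (if st.2.1 < cur - c2 then cur - c2 else st.2.1), j) := rfl
  rw [hstep, hcmin]
  have hmax : (if st.2.1 < cur - minFrom s b cur then cur - minFrom s b cur else st.2.1) =
      max st.2.1 (cur - minFrom s b cur) := by
    rw [max_def]; split <;> split <;> omega
  rw [hmax]

-- B's whole fold over the key-sorted pairs, characterised
theorem bFold_eq (s : List Int) (hsort : s.Pairwise (· ≤ ·)) :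
    ∀ (q : List (Int × Int)), q.Pairwise (fun u v => u.1 ≤ v.1) →
    ∀ (t sv j : Int), 0 ≤ j → j ≤ (s.length : Int) →
    (∀ k : Nat, (hk : k < s.length) → (k : Int) < j → ∀ p ∈ q, s[k] < p.1) →
    (q.foldl (bStep s (s.length : Int)) (t, sv, j)).1 = t + (q.map (fun p => |p.2 - p.1|)).sum ∧
    (q.foldl (bStep s (s.length : Int)) (t, sv, j)).2.1 =
      q.foldl (fun m p => max m (|p.2 - p.1| - minFrom s p.1 |p.2 - p.1|)) sv := by
  intro q
  induction q with
  | nil => intro _ t sv j _ _ _; simp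
  | cons p q' ih =>
    intro hpw t sv j hj0 hjn hbelow
    obtain ⟨heq, hA0, hAn, hAbelow⟩ :=
      bStep_eq s hsort (t, sv, j) p hj0 hjn (fun k hk hkj => hbelow k hk hkj p (List.mem_cons_self ..))
    have hhead : ∀ p' ∈ q', p.1 ≤ p'.1 := (List.pairwise_cons.mp hpw).1
    have ihh := ih (List.pairwise_cons.mp hpw).2 (t + |p.2 - p.1|)
      (max sv (|p.2 - p.1| - minFrom s p.1 |p.2 - p.1|))
      (advLoop s (s.length : Int) p.1 ((s.length : Int) - j).toNat j)
      hA0 hAn (fun k hk hkj p' hp' => lt_of_lt_of_le (hAbelow k hk hkj) (hhead p' hp'))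
    rw [List.foldl_cons, heq]
    refine ⟨?_, ?_⟩
    · rw [ihh.1, List.map_cons, List.sum_cons]; ring
    · rw [ihh.2, List.foldl_cons]

-- A's two index loops over range(len(nums1)) are folds over the zipped pairs
theorem foldl_range_pair (nums1 nums2 : List Int) (hpre : nums1.length ≤ nums2.length)
    (f : Int → Int → Int → Int) (init : Int) :
    (PySem.List.pyRange 0 (nums1.length : Int) 1).foldl
      (fun acc i => f acc (PySem.List.pyGetD nums1 i 0) (PySem.List.pyGetD nums2 i 0)) init =
    (nums1.zip nums2).foldl (fun acc p => f acc p.1 p.2) init := by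
  have hz : (nums1.zip nums2).length = nums1.length := by rw [List.length_zip]; omega
  have hcongr : ∀ acc : Int, ∀ i ∈ PySem.List.pyRange 0 (nums1.length : Int) 1,
      f acc (PySem.List.pyGetD nums1 i 0) (PySem.List.pyGetD nums2 i 0) =
      f acc (PySem.List.pyGetD (nums1.zip nums2) i (0, 0)).1 (PySem.List.pyGetD (nums1.zip nums2) i (0, 0)).2 := by
    intro acc i hi
    obtain ⟨h0, h1⟩ := PySem.List.mem_pyRange_one.mp hi
    have hg1 : PySem.List.pyGetD nums1 i 0 = nums1[i.toNat]'(by omega) :=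
      PySem.List.pyGetD_eq_getElem nums1 0 h0 h1
    have hg2 : PySem.List.pyGetD nums2 i 0 = nums2[i.toNat]'(by omega) :=
      PySem.List.pyGetD_eq_getElem nums2 0 h0 (by omega)
    have hgz : PySem.List.pyGetD (nums1.zip nums2) i (0, 0) = (nums1.zip nums2)[i.toNat]'(by omega) :=
      PySem.List.pyGetD_eq_getElem (nums1.zip nums2) (0, 0) h0 (by rw [hz]; exact h1)
    rw [hg1, hg2, hgz, List.getElem_zip]
  rw [PySem.List.foldl_congr_mem _ _ _ _ hcongr]
  have hlen : (nums1.length : Int) = ((nums1.zip nums2).length : Int) := by rw [hz]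
  rw [hlen]
  exact PySem.List.foldl_pyRange_zero_pyGetD' (nums1.zip nums2) (0, 0) (fun acc p => f acc p.1 p.2) init

-- ===== VERDICT (by name: the statement is the Claim_ definition above) =====
theorem minAbsoluteSumDiff_spec : Claim_equal_minAbsoluteSumDiff := by
  intro nums1 nums2 _hdom hpre
  unfold Pre_minAbsoluteSumDiff at hpre
  show minAbsoluteSumDiff nums1 nums2 = minAbsoluteSumDiff_alt nums1 nums2
  have hslen : (PySem.List.sorted nums1 (fun x => x) false).length = nums1.length :=
    PySem.List.length_sorted nums1 (fun x => x) false
  set s := PySem.List.sorted nums1 (fun x => x) false with hs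
  have hsort : s.Pairwise (· ≤ ·) := PySem.List.sorted_pairwise nums1 (fun x => x)
  set z := nums1.zip nums2 with hzdef
  -- A's first loop is the sum of |a - b| over the pairs
  have hA1 : (PySem.List.pyRange 0 (nums1.length : Int) 1).foldl
      (fun t i => t + |PySem.List.pyGetD nums1 i 0 - PySem.List.pyGetD nums2 i 0|) 0 =
      (z.map (fun p => |p.1 - p.2|)).sum := by
    rw [foldl_range_pair nums1 nums2 hpre (fun acc a b => acc + |a - b|) 0,
      PySem.List.foldl_add z (fun p => |p.1 - p.2|) 0, zero_add]
  -- A's second loop, with the binary search replaced by minFrom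
  have hA2 : (PySem.List.pyRange 0 (nums1.length : Int) 1).foldl
      (fun m i =>
        let cur := |PySem.List.pyGetD nums1 i 0 - PySem.List.pyGetD nums2 i 0|
        let mn := bsLoop s (PySem.List.pyGetD nums2 i 0) nums1.length 0 ((nums1.length : Int) - 1) cur
        max m (cur - mn)) 0 =
      z.foldl (fun m p => max m (|p.1 - p.2| - minFrom s p.2 |p.1 - p.2|)) 0 := by
    rw [foldl_range_pair nums1 nums2 hpre
      (fun m a b => max m (|a - b| - bsLoop s b nums1.length 0 ((nums1.length : Int) - 1) |a - b|)) 0]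
    refine PySem.List.foldl_congr_mem z _ _ 0 ?_
    intro acc p _
    have hbs : bsLoop s p.2 nums1.length 0 ((nums1.length : Int) - 1) |p.1 - p.2| = minFrom s p.2 |p.1 - p.2| := by
      have h := bsLoop_eq_minFrom s hsort p.2 |p.1 - p.2|
      rw [hslen] at h
      exact h
    rw [hbs]
  -- B's fold over the sorted pairs
  set q := PySem.List.sorted (nums2.zip nums1) (fun p => p.1) false with hq
  have hqpw : q.Pairwise (fun u v => u.1 ≤ v.1) := PySem.List.sorted_pairwise (nums2.zip nums1) (fun p => p.1)
  have hperm : q.Perm (nums2.zip nums1) := PySem.List.sorted_perm (nums2.zip nums1) (fun p => p.1) false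
  have hB := bFold_eq s hsort q hqpw 0 0 0 (by omega) (by omega) (by omega)
  have hswap : nums2.zip nums1 = z.map Prod.swap := by rw [hzdef, List.zip_swap]
  have hBsum : (q.map (fun p => |p.2 - p.1|)).sum = (z.map (fun p => |p.1 - p.2|)).sum := by
    rw [(hperm.map (fun p => |p.2 - p.1|)).sum_eq, hswap, List.map_map]
    rfl
  have hBmax : q.foldl (fun m p => max m (|p.2 - p.1| - minFrom s p.1 |p.2 - p.1|)) 0 =
      z.foldl (fun m p => max m (|p.1 - p.2| - minFrom s p.2 |p.1 - p.2|)) 0 := by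
    have hrc : RightCommutative (fun (m : Int) (p : Int × Int) =>
        max m (|p.2 - p.1| - minFrom s p.1 |p.2 - p.1|)) :=
      ⟨fun m p p' => max_right_comm m _ _⟩
    rw [List.Perm.foldl_eq (rcomm := hrc) hperm 0, hswap, List.foldl_map]
    simp only [Prod.fst_swap, Prod.snd_swap]
  -- assemble the two sides
  have haeq : minAbsoluteSumDiff nums1 nums2 =
      PySem.Int.mod ((z.map (fun p => |p.1 - p.2|)).sum -
        z.foldl (fun m p => max m (|p.1 - p.2| - minFrom s p.2 |p.1 - p.2|)) 0) 1000000007 := by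
    show PySem.Int.mod _ _ = _
    rw [hA1, hA2]
  have hbeq : minAbsoluteSumDiff_alt nums1 nums2 =
      PySem.Int.mod ((z.map (fun p => |p.1 - p.2|)).sum -
        z.foldl (fun m p => max m (|p.1 - p.2| - minFrom s p.2 |p.1 - p.2|)) 0) 1000000007 := by
    show PySem.Int.mod ((q.foldl (bStep s (nums1.length : Int)) (0, 0, 0)).1 -
      (q.foldl (bStep s (nums1.length : Int)) (0, 0, 0)).2.1) 1000000007 = _
    have hn : (nums1.length : Int) = ((s.length : Int)) := by rw [hslen]
    rw [hn, hB.1, hB.2, zero_add, hBsum, hBmax]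
  rw [haeq, hbeq]
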